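-- pv_equiv track=rewrite | github.com/xingkaixin/agent-dump | src/agent_dump/query_filter.py | _contains_structured_query_terms
-- ===== SOURCE A (Python) =====
-- STRUCTURED_QUERY_KEYS = {"provider", "role", "path", "cwd", "limit"}
--
-- def _contains_structured_query_terms(query: str) -> bool:
--     for token in query.split():
--         key, separator, _ = token.partition(":")
--         if not separator:
--             continue
--         if key.strip().lower() in STRUCTURED_QUERY_KEYS:
--             return True
--     return False
-- ===== SOURCE B (Python) =====
-- def _contains_structured_query_terms(query: str) -> bool:
--     keys = ("provider", "role", "path", "cwd", "limit")
--     prefix = ""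
--     skip = False
--     for ch in query:
--         if ch.isspace():
--             prefix = ""
--             skip = False
--         elif skip:
--             continue
--         elif ch == ":":
--             if prefix.lower() in keys:
--                 return True
--             skip = True
--         else:
--             prefix += ch
--     return False
-- ===== Notes on version B (the rewrite author's own statement) =====
-- stated objective: alternative
-- what changed: Replaced A's split()-into-token-list + per-token partition(':') + set membership with a single left-to-right character scan (state machine tracking the current token's pre-colon prefix and a skip flag) that builds no token list.
import Mathlib
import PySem

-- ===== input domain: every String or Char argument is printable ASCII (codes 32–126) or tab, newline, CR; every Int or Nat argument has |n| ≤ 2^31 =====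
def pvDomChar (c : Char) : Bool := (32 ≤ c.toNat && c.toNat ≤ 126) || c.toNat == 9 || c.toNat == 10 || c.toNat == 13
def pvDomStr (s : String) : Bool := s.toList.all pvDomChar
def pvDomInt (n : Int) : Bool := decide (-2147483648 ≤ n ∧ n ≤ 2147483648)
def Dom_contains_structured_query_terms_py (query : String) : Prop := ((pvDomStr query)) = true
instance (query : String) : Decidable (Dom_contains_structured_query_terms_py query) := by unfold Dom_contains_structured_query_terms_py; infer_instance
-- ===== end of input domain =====

-- B replaces A's split-into-tokens / partition(':') / set-membership loop by a single
-- left-to-right character scan that tracks the current token's pre-colon prefix (objective: alternative, one pass, no token list built).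

-- ===== PORT A =====
-- Python set literal STRUCTURED_QUERY_KEYS
def pvKeysSetA : PySem.Set (List Char) :=
  PySem.Set.ofList ["provider".toList, "role".toList, "path".toList, "cwd".toList, "limit".toList]

-- hand port of token.partition(":") (PySem has no partition): split at the FIRST ':';
-- exact: returns (before, sep-found?, after), sep-found? = false with before = whole token when no ':'.
def pvPartitionColon : List Char → List Char × Bool × List Char
  | [] => ([], false, [])
  | c :: rest =>
    if c = ':' then ([], true, rest)
    else
      let p := pvPartitionColon rest
      (c :: p.1, p.2.1, p.2.2)

-- A's for-loop over query.split() with early return / continue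
def pvALoop : List (List Char) → Bool
  | [] => false
  | t :: rest =>
    let p := pvPartitionColon t
    if p.2.1 = false then pvALoop rest
    else if PySem.Set.contains pvKeysSetA (PySem.Chars.lower (PySem.Chars.strip p.1)) then true
    else pvALoop rest

def contains_structured_query_terms_py (query : String) : Bool :=
  pvALoop (PySem.Chars.split₀ query.toList)

-- ===== PORT B =====
-- B's keys tuple
def pvKeysB : List (List Char) :=
  ["provider".toList, "role".toList, "path".toList, "cwd".toList, "limit".toList]

-- B's single scan: pre = chars of the current token before its first ':', skip = a ':' was
-- already seen in this token and the prefix did not match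
def pvBScan : List Char → List Char → Bool → Bool
  | [], _, _ => false
  | c :: rest, pre, skip =>
    if PySem.Chars.isspace c then pvBScan rest [] false
    else if skip then pvBScan rest pre skip
    else if c = ':' then
      if pvKeysB.contains (PySem.Chars.lower pre) then true
      else pvBScan rest pre true
    else pvBScan rest (pre ++ [c]) false

def contains_structured_query_terms_py_alt (query : String) : Bool :=
  pvBScan query.toList [] false

-- ===== PRECONDITION & SPEC =====
def Spec_contains_structured_query_terms_py (query : String) (out : Bool) : Prop := out = contains_structured_query_terms_py_alt query
instance (query : String) (out : Bool) : Decidable (Spec_contains_structured_query_terms_py query out) := by unfold Spec_contains_structured_query_terms_py; infer_instance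

-- ===== CLAIM (what is proved, stated in full; the proofs are below) =====
def Claim_equal_contains_structured_query_terms_py : Prop := ∀ (query : String), Dom_contains_structured_query_terms_py query → Spec_contains_structured_query_terms_py query (contains_structured_query_terms_py query)

-- ===== LEMMAS AND PROOFS =====

-- whether a single token makes A return True
def pvHit (t : List Char) : Bool :=
  let p := pvPartitionColon t
  p.2.1 && PySem.Set.contains pvKeysSetA (PySem.Chars.lower (PySem.Chars.strip p.1))

lemma pvALoop_eq_any (ts : List (List Char)) : pvALoop ts = ts.any pvHit := by
  induction ts with
  | nil => rfl
  | cons t rest ih =>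
    simp only [pvALoop, pvHit, List.any_cons]
    split_ifs with h1 h2 <;> simp_all

lemma pvPartitionColon_noColon (t : List Char) (h : ∀ c ∈ t, c ≠ ':') :
    pvPartitionColon t = (t, false, []) := by
  induction t with
  | nil => rfl
  | cons c rest ih =>
    have hc : c ≠ ':' := h c (by simp)
    simp only [pvPartitionColon, if_neg hc, ih (fun x hx => h x (by simp [hx]))]

lemma pvPartitionColon_colon (pre suf : List Char) (h : ∀ c ∈ pre, c ≠ ':') :
    pvPartitionColon (pre ++ ':' :: suf) = (pre, true, suf) := by
  induction pre with
  | nil => simp [pvPartitionColon]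
  | cons c rest ih =>
    have hc : c ≠ ':' := h c (by simp)
    simp only [List.cons_append, pvPartitionColon, if_neg hc,
      ih (fun x hx => h x (by simp [hx]))]

lemma dropWhile_isspace_eq_self (t : List Char) (h : ∀ c ∈ t, PySem.Chars.isspace c = false) :
    t.dropWhile PySem.Chars.isspace = t := by
  cases t with
  | nil => rfl
  | cons c rest => simp [h c (by simp)]

lemma strip_nospace (t : List Char) (h : ∀ c ∈ t, PySem.Chars.isspace c = false) :
    PySem.Chars.strip t = t := by
  unfold PySem.Chars.strip PySem.Chars.lstrip PySem.Chars.rstrip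
  rw [dropWhile_isspace_eq_self t h,
    dropWhile_isspace_eq_self t.reverse (fun c hc => h c (List.mem_reverse.mp hc)),
    List.reverse_reverse]

lemma pvHit_noColon (t : List Char) (h : ∀ c ∈ t, c ≠ ':') : pvHit t = false := by
  simp [pvHit, pvPartitionColon_noColon t h]

-- the two defining equations of PySem.Chars.split₀.go, restated for rewriting
lemma go_nil (cur : List Char) (acc : List (List Char)) :
    PySem.Chars.split₀.go [] cur acc =
      if cur.isEmpty then acc.reverse else (cur.reverse :: acc).reverse := by
  simp only [PySem.Chars.split₀.go]

lemma go_step (c : Char) (rest cur : List Char) (acc : List (List Char)) :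
    PySem.Chars.split₀.go (c :: rest) cur acc =
      if PySem.Chars.isspace c then
        (if cur.isEmpty then PySem.Chars.split₀.go rest [] acc
         else PySem.Chars.split₀.go rest [] (cur.reverse :: acc))
      else PySem.Chars.split₀.go rest (c :: cur) acc := by
  simp only [PySem.Chars.split₀.go]

-- go with a nonempty accumulator = emitted prefix ++ go with empty accumulator
lemma go_acc (cs : List Char) : ∀ cur acc,
    PySem.Chars.split₀.go cs cur acc = acc.reverse ++ PySem.Chars.split₀.go cs cur [] := by
  induction cs with
  | nil =>
    intro cur acc
    rw [go_nil, go_nil]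
    split_ifs <;> simp
  | cons c rest ih =>
    intro cur acc
    rw [go_step, go_step]
    split_ifs with h1 h2
    · rw [ih [] acc]
    · rw [ih [] (cur.reverse :: acc), ih [] [cur.reverse]]
      simp
    · rw [ih (c :: cur) acc]

-- a scan that is mid-token with (reversed) current token cur emits cur.reverse extended to the
-- next whitespace, then continues as a fresh split of the remainder
lemma go_cons (cs : List Char) : ∀ cur, cur ≠ [] →
    PySem.Chars.split₀.go cs cur [] =
      (cur.reverse ++ cs.takeWhile (fun c => !PySem.Chars.isspace c)) ::
        PySem.Chars.split₀.go (cs.dropWhile (fun c => !PySem.Chars.isspace c)) [] [] := by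
  induction cs with
  | nil =>
    intro cur hcur
    rw [go_nil]
    simp [go_nil, List.isEmpty_iff, hcur]
  | cons c rest ih =>
    intro cur hcur
    by_cases hs : PySem.Chars.isspace c = true
    · rw [go_step, if_pos hs, if_neg (by simp [List.isEmpty_iff, hcur]), go_acc,
        List.takeWhile_cons, List.dropWhile_cons]
      simp only [hs, Bool.not_true, Bool.false_eq_true, if_false, go_step, if_pos hs,
        List.isEmpty_nil, if_true]
      simp
    · rw [go_step, if_neg hs, ih (c :: cur) (by simp),
        List.takeWhile_cons, List.dropWhile_cons]
      simp [Bool.eq_false_iff.mpr hs]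

-- in skip state B runs to the next whitespace and restarts there
lemma pvBScan_skip (cs : List Char) : ∀ pre,
    pvBScan cs pre true =
      pvBScan (cs.dropWhile (fun c => !PySem.Chars.isspace c)) [] false := by
  induction cs with
  | nil => intro pre; rfl
  | cons c rest ih =>
    intro pre
    by_cases hs : PySem.Chars.isspace c = true
    · simp [pvBScan, hs]
    · simp [pvBScan, hs, ih]

lemma keysA_eq_keysB : pvKeysSetA = pvKeysB := by decide

lemma length_dropWhile_le {α : Type} (p : α → Bool) (l : List α) :
    (l.dropWhile p).length ≤ l.length := by
  induction l with
  | nil => simp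
  | cons c rest ih =>
    rw [List.dropWhile_cons]
    split_ifs <;> simp [ih] <;> omega

-- main invariant: mid-token with colon-free, space-free prefix pre, B's scan agrees with
-- "some remaining token of A's split is a hit"
lemma pvMain : ∀ (n : Nat) (cs : List Char), cs.length ≤ n →
    ∀ pre : List Char, (∀ c ∈ pre, PySem.Chars.isspace c = false ∧ c ≠ ':') →
    pvBScan cs pre false = (PySem.Chars.split₀.go cs pre.reverse []).any pvHit := by
  intro n
  induction n with
  | zero =>
    intro cs hlen pre hpre
    have : cs = [] := List.eq_nil_of_length_eq_zero (Nat.le_zero.mp hlen)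
    subst this
    rw [go_nil]
    split_ifs with h
    · rfl
    · simp [pvBScan, pvHit_noColon pre (fun c hc => (hpre c hc).2)]
  | succ m ih =>
    intro cs hlen pre hpre
    cases cs with
    | nil =>
      rw [go_nil]
      split_ifs with h
      · rfl
      · simp [pvBScan, pvHit_noColon pre (fun c hc => (hpre c hc).2)]
    | cons c rest =>
      have hrest : rest.length ≤ m := by simp at hlen; omega
      by_cases hs : PySem.Chars.isspace c = true
      · -- whitespace: current token (if any) is emitted; it is not a hit (no colon in it)
        rw [go_step, if_pos hs]
        simp only [pvBScan, if_pos hs]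
        split_ifs with h
        · have := ih rest hrest [] (by simp)
          simpa using this
        · rw [go_acc rest [] [pre.reverse.reverse]]
          simp only [List.reverse_cons, List.reverse_nil, List.nil_append, List.reverse_reverse,
            List.any_append, List.any_cons, List.any_nil,
            pvHit_noColon pre (fun c hc => (hpre c hc).2), Bool.false_or, Bool.or_false]
          simpa using ih rest hrest [] (by simp)
      · by_cases hc : c = ':'
        · -- first colon of the token: A's key for this token is exactly pre
          subst hc
          rw [go_step, if_neg hs, go_cons rest (':' :: pre.reverse) (by simp)]
          simp only [pvBScan, if_neg hs, Bool.false_eq_true, if_false, if_pos rfl]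
          have hkey : pvHit ((':' :: pre.reverse).reverse ++
              rest.takeWhile (fun c => !PySem.Chars.isspace c)) =
              PySem.Set.contains pvKeysSetA (PySem.Chars.lower pre) := by
            simp only [List.reverse_cons, List.reverse_reverse, List.append_assoc,
              List.cons_append, List.nil_append, pvHit,
              pvPartitionColon_colon pre _ (fun c hcm => (hpre c hcm).2),
              strip_nospace pre (fun c hcm => (hpre c hcm).1), Bool.true_and]
          rw [List.any_cons, hkey, keysA_eq_keysB]
          by_cases hmem : pvKeysB.contains (PySem.Chars.lower pre) = true
          · rw [if_pos hmem,
              show PySem.Set.contains pvKeysB (PySem.Chars.lower pre) = true from hmem]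
            simp
          · rw [if_neg hmem]
            simp only [PySem.Set.contains]
            rw [Bool.eq_false_iff.mpr hmem, Bool.false_or, pvBScan_skip rest pre]
            simpa using ih _ (le_trans (length_dropWhile_le _ rest) hrest) [] (by simp)
        · -- ordinary character: extend the prefix
          rw [go_step, if_neg hs]
          simp only [pvBScan, if_neg hs, Bool.false_eq_true, if_false, if_neg hc]
          have e : (pre ++ [c]).reverse = c :: pre.reverse := by simp
          rw [← e]
          exact ih rest hrest (pre ++ [c]) (by
            intro x hx
            rcases List.mem_append.mp hx with h' | h'
            · exact hpre x h'
            · simp at h'; subst h'; exact ⟨Bool.eq_false_iff.mpr hs, hc⟩)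

-- ===== VERDICT (by name: the statement is the Claim_ definition above) =====
theorem contains_structured_query_terms_py_spec : Claim_equal_contains_structured_query_terms_py := by
  intro query _
  unfold Spec_contains_structured_query_terms_py
  unfold contains_structured_query_terms_py contains_structured_query_terms_py_alt
  rw [pvALoop_eq_any]
  unfold PySem.Chars.split₀
  exact (pvMain query.toList.length query.toList le_rfl [] (by simp)).symm
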